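-- pv_equiv track=rewrite | github.com/arzaanxeng/Python_Codes | fundamentals/log_file_forensics.py | ip_threat
-- ===== SOURCE A (Python) =====
-- def ip_threat(data):
--     ip_scores = {}
--     for ip, level, http, _ in data:
--         if ip not in ip_scores:
--             ip_scores[ip] = 0
--         if level == "ERROR":
--             ip_scores[ip] += 2
--         elif level == "WARN":
--             ip_scores[ip] += 1
--         if http in ["403", "500"]:
--             ip_scores[ip] += 1
--     return ip_scores
-- ===== SOURCE B (Python) =====
-- def ip_threat(data):
--     ips = list(dict.fromkeys(ip for ip, _, _, _ in data))
--     return {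
--         ip: sum(
--             (2 if level == "ERROR" else 1 if level == "WARN" else 0)
--             + (1 if http in ("403", "500") else 0)
--             for a, level, http, _ in data
--             if a == ip
--         )
--         for ip in ips
--     }
-- ===== Notes on version B (the rewrite author's own statement) =====
-- stated objective: idiomatic
-- what changed: Replaces the single streaming dict-accumulation pass with an index-then-rescan: first dedupe the IPs in first-occurrence order with dict.fromkeys, then a dict comprehension that sums each IP's scores with a generator rescan of the data.
import Mathlib
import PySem

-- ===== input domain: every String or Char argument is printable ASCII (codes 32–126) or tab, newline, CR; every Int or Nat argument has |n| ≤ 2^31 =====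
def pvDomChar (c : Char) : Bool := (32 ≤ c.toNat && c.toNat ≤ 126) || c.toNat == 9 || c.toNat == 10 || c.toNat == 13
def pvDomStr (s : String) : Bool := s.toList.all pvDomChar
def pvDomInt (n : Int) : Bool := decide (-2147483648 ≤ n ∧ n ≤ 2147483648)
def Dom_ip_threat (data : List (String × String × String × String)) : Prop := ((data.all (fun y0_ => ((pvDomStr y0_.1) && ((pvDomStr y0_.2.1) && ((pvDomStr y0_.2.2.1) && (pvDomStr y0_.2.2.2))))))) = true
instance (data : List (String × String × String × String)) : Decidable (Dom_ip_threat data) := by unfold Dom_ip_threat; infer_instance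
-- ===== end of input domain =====

-- B replaces A's single streaming dict-accumulation pass with an index-then-rescan:
-- dedupe the IPs in first-occurrence order, then sum each IP's scores by rescanning the data (idiomatic; not faster).


-- ===== PORT A =====
-- one pass: for each row, ensure the key exists (default 0), then apply the level and http increments in place
def ipStep (d : PySem.Dict String Int) (r : String × String × String × String) : PySem.Dict String Int :=
  let d := if (d.get? r.1).isNone then d.insert r.1 0 else d
  let d := if r.2.1 == "ERROR" then d.modify r.1 0 (· + 2)
           else if r.2.1 == "WARN" then d.modify r.1 0 (· + 1) else d
  if r.2.2.1 == "403" || r.2.2.1 == "500" then d.modify r.1 0 (· + 1) else d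

def ip_threat (data : List (String × String × String × String)) : List (String × Int) :=
  (data.foldl ipStep ⟨[]⟩).items

-- ===== PORT B =====
-- score of a single row (the generator's summand in Source B)
def rowScore (r : String × String × String × String) : Int :=
  (if r.2.1 == "ERROR" then 2 else if r.2.1 == "WARN" then 1 else 0)
  + (if r.2.2.1 == "403" || r.2.2.1 == "500" then 1 else 0)

def ip_threat_alt (data : List (String × String × String × String)) : List (String × Int) :=
  let ips := PySem.List.dedup (data.map (·.1))
  ips.map (fun ip => (ip, ((data.filter (fun r => r.1 == ip)).map rowScore).sum))

-- ===== PRECONDITION & SPEC =====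
def Spec_ip_threat (data : List (String × String × String × String)) (out : List (String × Int)) : Prop := out = ip_threat_alt data
instance (data : List (String × String × String × String)) (out : List (String × Int)) : Decidable (Spec_ip_threat data out) := by unfold Spec_ip_threat; infer_instance

-- ===== CLAIM (what is proved, stated in full; the proofs are below) =====
def Claim_equal_ip_threat : Prop := ∀ (data : List (String × String × String × String)), Dom_ip_threat data → Spec_ip_threat data (ip_threat data)

-- ===== LEMMAS AND PROOFS =====

-- total score B assigns to key k over the whole list (B's inner generator sum)
def sumFor (data : List (String × String × String × String)) (k : String) : Int :=
  ((data.filter (fun r => r.1 == k)).map rowScore).sum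

theorem find?_keyed_some (keys : List String) (f : String → Int) (k : String)
    (hk : k ∈ keys) :
    List.find? (fun p => p.1 == k) (keys.map (fun k' => (k', f k'))) = some (k, f k) := by
  induction keys with
  | nil => cases hk
  | cons a t ih =>
    by_cases h : a = k
    · subst h; simp
    · have hk' : k ∈ t := by
        cases hk with
        | head => exact absurd rfl h
        | tail _ h' => exact h'
      simpa [List.find?, h] using ih hk'

theorem find?_keyed_none (keys : List String) (f : String → Int) (k : String)
    (hk : k ∉ keys) :
    List.find? (fun p => p.1 == k) (keys.map (fun k' => (k', f k'))) = none := by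
  rw [List.find?_eq_none]
  intro p hp
  simp only [List.mem_map] at hp
  obtain ⟨k', hk', rfl⟩ := hp
  simp only [beq_iff_eq]
  rintro rfl
  exact hk hk'

theorem insert_keyed (keys : List String) (f : String → Int) (k : String) (v : Int)
    (hk : k ∈ keys) :
    PySem.Dict.insert ⟨keys.map (fun k' => (k', f k'))⟩ k v
      = ⟨keys.map (fun k' => (k', if k' = k then v else f k'))⟩ := by
  have hc : PySem.Dict.contains (⟨keys.map (fun k' => (k', f k'))⟩ : PySem.Dict String Int) k = true := by
    simp only [PySem.Dict.contains, List.any_eq_true]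
    exact ⟨(k, f k), List.mem_map.mpr ⟨k, hk, rfl⟩, by simp⟩
  simp only [PySem.Dict.insert, hc, if_true, List.map_map]
  congr 1
  apply List.map_congr_left
  intro x _
  by_cases h : x = k <;> simp [h]

theorem modify_keyed (keys : List String) (f : String → Int) (k : String) (g : Int → Int)
    (hk : k ∈ keys) :
    PySem.Dict.modify ⟨keys.map (fun k' => (k', f k'))⟩ k 0 g
      = ⟨keys.map (fun k' => (k', if k' = k then g (f k) else f k'))⟩ := by
  simp only [PySem.Dict.modify, PySem.Dict.getD, PySem.Dict.get?, find?_keyed_some keys f k hk]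
  exact insert_keyed keys f k (g (f k)) hk

theorem ipStep_map (keys : List String) (f : String → Int)
    (r : String × String × String × String) (hk : r.1 ∈ keys) :
    ipStep ⟨keys.map (fun k' => (k', f k'))⟩ r
      = ⟨keys.map (fun k' => (k', if k' = r.1 then f r.1 + rowScore r else f k'))⟩ := by
  obtain ⟨ip, level, http, x⟩ := r
  simp only at hk
  have h1 : (PySem.Dict.get? (⟨keys.map (fun k' => (k', f k'))⟩ : PySem.Dict String Int) ip).isNone = false := by
    simp [PySem.Dict.get?, find?_keyed_some keys f ip hk]
  have hmod : ∀ (f' : String → Int) (g : Int → Int),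
      PySem.Dict.modify ⟨keys.map (fun k' => (k', f' k'))⟩ ip 0 g
        = ⟨keys.map (fun k' => (k', if k' = ip then g (f' ip) else f' k'))⟩ :=
    fun f' g => modify_keyed keys f' ip g hk
  simp only [ipStep, h1, Bool.false_eq_true, if_false, rowScore]
  by_cases hE : level == "ERROR" <;> by_cases hW : level == "WARN" <;>
    by_cases hH : (http == "403" || http == "500") = true <;>
      simp only [hE, hW, hH, if_true, if_false, Bool.false_eq_true, hmod] <;>
      exact congrArg PySem.Dict.mk (List.map_congr_left (fun k' _ => by
        by_cases h : k' = ip <;> simp [h] <;> try ring))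

theorem sumFor_append (data : List (String × String × String × String))
    (r : String × String × String × String) (k : String) :
    sumFor (data ++ [r]) k = sumFor data k + (if k = r.1 then rowScore r else 0) := by
  by_cases h : k = r.1
  · have h' : (r.1 == k) = true := by simp [h]
    simp [sumFor, List.filter_append, List.filter, h]
  · have h' : (r.1 == k) = false := by
      simp only [beq_eq_false_iff_ne, ne_eq]
      exact fun e => h e.symm
    simp [sumFor, List.filter_append, List.filter, h, h']

theorem sumFor_zero (data : List (String × String × String × String)) (k : String)
    (hk : k ∉ data.map (·.1)) : sumFor data k = 0 := by
  have : data.filter (fun r => r.1 == k) = [] := by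
    rw [List.filter_eq_nil_iff]
    intro r hr
    simp only [beq_iff_eq]
    rintro rfl
    exact hk (List.mem_map.mpr ⟨r, hr, rfl⟩)
  simp [sumFor, this]

theorem dedup_append_singleton {α : Type} [BEq α] (xs : List α) (x : α) :
    PySem.List.dedup (xs ++ [x]) = PySem.Set.add (PySem.List.dedup xs) x := by
  simp [PySem.List.dedup, PySem.Set.ofList, List.foldl_append]

theorem fold_eq (data : List (String × String × String × String)) :
    data.foldl ipStep ⟨[]⟩
      = ⟨(PySem.List.dedup (data.map (·.1))).map (fun k => (k, sumFor data k))⟩ := by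
  induction data using List.reverseRecOn with
  | nil => simp [PySem.List.dedup, PySem.Set.ofList, PySem.Set.empty, sumFor]
  | append_singleton xs r ih =>
    rw [List.foldl_append, List.foldl_cons, List.foldl_nil, ih]
    simp only [List.map_append, List.map_cons, List.map_nil]
    rw [dedup_append_singleton]
    set keys := PySem.List.dedup (xs.map (·.1)) with hkeys
    have hmem : ∀ y, y ∈ keys ↔ y ∈ xs.map (·.1) := by
      intro y; rw [hkeys]; exact PySem.Set.mem_ofList _ _
    by_cases hc : r.1 ∈ keys
    · have hadd : PySem.Set.add keys r.1 = keys := by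
        simp [PySem.Set.add, PySem.Set.contains, hc]
      rw [hadd, ipStep_map keys (sumFor xs) r hc]
      congr 1
      apply List.map_congr_left
      intro k' _
      by_cases h : k' = r.1 <;> simp [h, sumFor_append]
    · have hadd : PySem.Set.add keys r.1 = keys ++ [r.1] := by
        simp [PySem.Set.add, PySem.Set.contains, hc]
      have h0 : sumFor xs r.1 = 0 :=
        sumFor_zero xs r.1 (fun h => hc ((hmem r.1).mpr h))
      have hnone : (PySem.Dict.get? (⟨keys.map (fun k' => (k', sumFor xs k'))⟩ : PySem.Dict String Int) r.1).isNone = true := by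
        simp [PySem.Dict.get?, find?_keyed_none keys (sumFor xs) r.1 hc]
      have hins : PySem.Dict.insert (⟨keys.map (fun k' => (k', sumFor xs k'))⟩ : PySem.Dict String Int) r.1 0
          = ⟨(keys ++ [r.1]).map (fun k' => (k', if k' = r.1 then 0 else sumFor xs k'))⟩ := by
        have hcf : PySem.Dict.contains (⟨keys.map (fun k' => (k', sumFor xs k'))⟩ : PySem.Dict String Int) r.1 = false := by
          simp only [PySem.Dict.contains, List.any_eq_false]
          intro p hp
          simp only [List.mem_map] at hp
          obtain ⟨k', hk', rfl⟩ := hp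
          simp only [beq_iff_eq]
          rintro rfl
          exact hc hk'
        simp only [PySem.Dict.insert, hcf, Bool.false_eq_true, if_false, List.map_append,
          List.map_cons, List.map_nil]
        congr 2
        apply List.map_congr_left
        intro k' hk'
        have : ¬ k' = r.1 := fun h => hc (h ▸ hk')
        simp [this]
      have hstep : ipStep (⟨keys.map (fun k' => (k', sumFor xs k'))⟩ : PySem.Dict String Int) r
          = ipStep (⟨(keys ++ [r.1]).map (fun k' => (k', if k' = r.1 then 0 else sumFor xs k'))⟩ : PySem.Dict String Int) r := by
        have h1 : (PySem.Dict.get? (⟨(keys ++ [r.1]).map (fun k' => (k', if k' = r.1 then 0 else sumFor xs k'))⟩ : PySem.Dict String Int) r.1).isNone = false := by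
          simp [PySem.Dict.get?]
        simp only [ipStep, hnone, if_true, hins, h1, Bool.false_eq_true, if_false]
      rw [hstep, ipStep_map (keys ++ [r.1]) _ r (List.mem_append_right _ (List.mem_singleton.mpr rfl)), hadd]
      congr 1
      apply List.map_congr_left
      intro k' hk'
      by_cases h : k' = r.1
      · simp [h, sumFor_append, h0]
      · have hk'' : k' ∈ keys := by
          rcases List.mem_append.mp hk' with h' | h'
          · exact h'
          · exact absurd (List.mem_singleton.mp h') h
        simp [h, sumFor_append]

-- ===== VERDICT (by name: the statement is the Claim_ definition above) =====
theorem ip_threat_spec : Claim_equal_ip_threat := by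
  intro data _
  show ip_threat data = ip_threat_alt data
  rw [ip_threat, fold_eq]
  rfl
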